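-- pv_equiv track=rewrite | github.com/pgrabiec/Compiler | grammar_parser/parser_main.py | truncate_input
-- ===== SOURCE A (Python) =====
-- def truncate_input(text):
--     state = -3
--     length = len(text)
--     output = ""
--     p = 0
--     while p < length:
--         character = text[p]
--         if character == "\"":
--             if state == -3:
--                 state += 1
--             elif state == -2:
--                 state += 1
--             elif state == -1:
--                 state += 1
--                 output += "\"\"\""
--             elif state == 0:
--                 state += 1
--             elif state == 1:
--                 state += 1
--             elif state == 2:
--                 output += "\"\"\"\n"
--                 state = -3
--         else:
--             if state == -3:
--                 pass
--             elif state == -2: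
--                 state = -3
--             elif state == -1:
--                 state = -3
--             elif state == 0:
--                 output += character
--             elif state == 1:
--                 output += "\"" + character
--                 state = 0
--             elif state == 2:
--                 output += "\"\"" + character
--                 state = 0
--         p += 1
--     return output
-- ===== SOURCE B (Python) =====
-- def truncate_input(text):
--     ps = text.split('"""')
--     out = ''
--     while len(ps) >= 2:
--         if len(ps) == 2:
--             out += '"""' + ps[1].rstrip('"')
--         else:
--             out += '"""' + ps[1] + '"""\n'
--         ps = ps[2:]
--     return out
-- ===== Notes on version B (the rewrite author's own statement) =====
-- stated objective: simpler
-- what changed: Replaced the six-state per-character FSM with a split on the triple-quote delimiter followed by a short loop that re-emits each inside segment, closing terminated blocks with a newline and stripping pending trailing quote characters off a final unterminated block.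
import Mathlib
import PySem

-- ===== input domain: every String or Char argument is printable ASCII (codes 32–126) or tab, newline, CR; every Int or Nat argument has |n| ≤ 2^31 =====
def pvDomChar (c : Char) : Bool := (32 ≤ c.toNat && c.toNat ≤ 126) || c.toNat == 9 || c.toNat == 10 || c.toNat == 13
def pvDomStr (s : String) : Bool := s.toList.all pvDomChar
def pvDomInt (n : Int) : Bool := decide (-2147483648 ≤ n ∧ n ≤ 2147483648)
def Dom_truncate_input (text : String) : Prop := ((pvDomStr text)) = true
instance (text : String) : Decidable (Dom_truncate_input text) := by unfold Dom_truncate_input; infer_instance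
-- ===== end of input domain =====

-- B replaces A's six-state per-character FSM by a split on the triple-quote delimiter plus a
-- short loop over the resulting segments; same O(n) cost, simpler and measured faster (C-level split).

-- ===== PORT A =====
-- the while-loop over indices p, as structural recursion over the same characters,
-- with the same state and output accumulator
def truncAux (state : Int) (out : List Char) : List Char → List Char
  | [] => out
  | c :: rest =>
    if c = '"' then
      if state = -3 then truncAux (state + 1) out rest
      else if state = -2 then truncAux (state + 1) out rest
      else if state = -1 then truncAux (state + 1) (out ++ ['"', '"', '"']) rest
      else if state = 0 then truncAux (state + 1) out rest
      else if state = 1 then truncAux (state + 1) out rest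
      else if state = 2 then truncAux (-3) (out ++ ['"', '"', '"', '\n']) rest
      else truncAux state out rest
    else
      if state = -3 then truncAux state out rest
      else if state = -2 then truncAux (-3) out rest
      else if state = -1 then truncAux (-3) out rest
      else if state = 0 then truncAux state (out ++ [c]) rest
      else if state = 1 then truncAux 0 (out ++ ['"', c]) rest
      else if state = 2 then truncAux 0 (out ++ ['"', '"', c]) rest
      else truncAux state out rest

def truncate_input (text : String) : String :=
  String.ofList (truncAux (-3) [] text.toList)

-- ===== PORT B =====
-- exact hand port of Python's  p.rstrip('\"')  : drop trailing '\"' characters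
def rstripQuotes (p : List Char) : List Char :=
  (p.reverse.dropWhile (· = '"')).reverse

-- the  while len(ps) >= 2  loop of Source B: consume ps two segments at a time, appending to out
def bLoop : List (List Char) → List Char → List Char
  | _ :: p1 :: rest, out =>
      if rest = [] then bLoop rest (out ++ ['"', '"', '"'] ++ rstripQuotes p1)
      else bLoop rest (out ++ ['"', '"', '"'] ++ p1 ++ ['"', '"', '"', '\n'])
  | _, out => out

def truncate_input_alt (text : String) : String :=
  String.ofList (bLoop (PySem.Chars.splitOn text.toList ['\"', '\"', '\"']) [])

-- ===== PRECONDITION & SPEC =====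
def Spec_truncate_input (text : String) (out : String) : Prop := out = truncate_input_alt text
instance (text : String) (out : String) : Decidable (Spec_truncate_input text out) := by unfold Spec_truncate_input; infer_instance

-- ===== CLAIM (what is proved, stated in full; the proofs are below) =====
def Claim_equal_truncate_input : Prop := ∀ (text : String), Dom_truncate_input text → Spec_truncate_input text (truncate_input text)

-- ===== LEMMAS AND PROOFS =====
def splitQ : List Char → List (List Char)
  | '"' :: '"' :: '"' :: rest => [] :: splitQ rest
  | c :: rest => (splitQ rest).modifyHead (c :: ·)
  | [] => [[]]

theorem splitQ_cons_of_ne (c : Char) (rest : List Char)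
    (h : ∀ rest', c = '"' → rest = '"' :: '"' :: rest' → False) :
    splitQ (c :: rest) = (splitQ rest).modifyHead (c :: ·) := by
  by_cases hc : c = '"'
  · subst hc
    match rest with
    | [] => rfl
    | [d] => by_cases hd : d = '"' <;> simp [splitQ, hd]
    | d :: e :: t =>
      by_cases hd : d = '"'
      · subst hd
        by_cases he : e = '"'
        · exact (h t rfl (by rw [he])).elim
        · simp [splitQ, he]
      · simp [splitQ, hd]
  · simp [splitQ]

theorem splitQ_ne_nil (l : List Char) : splitQ l ≠ [] := by
  induction l using splitQ.induct with
  | case1 rest ih => simp [splitQ]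
  | case2 c rest h ih =>
      rw [splitQ_cons_of_ne c rest h]
      cases hs : splitQ rest
      · exact absurd hs ih
      · simp
  | case3 => simp [splitQ]

theorem not_pre_of (c : Char) (rest : List Char)
    (hp : ¬ ['"', '"', '"'].isPrefixOf (c :: rest) = true) :
    ∀ rest', c = '"' → rest = '"' :: '"' :: rest' → False := by
  intro rest' hc hr
  subst hc; subst hr
  simp [List.isPrefixOf] at hp

theorem splitOn_go_eq (fuel : Nat) :
    ∀ (l cur : List Char) (acc : List (List Char)), l.length < fuel →
      PySem.Chars.splitOn.go ['"', '"', '"'] fuel l cur acc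
        = acc.reverse ++ (splitQ l).modifyHead (cur.reverse ++ ·) := by
  induction fuel with
  | zero => intro l cur acc h; omega
  | succ fuel ih =>
    intro l cur acc h
    cases l with
    | nil =>
      rw [PySem.Chars.splitOn.go.eq_def]
      simp [splitQ]
    | cons c rest =>
      rw [PySem.Chars.splitOn.go.eq_def]
      simp only []
      by_cases hp : ['"', '"', '"'].isPrefixOf (c :: rest) = true
      · rw [if_pos hp, ih _ _ _ (by simp at h ⊢; omega)]
        obtain ⟨t, ht⟩ := (List.isPrefixOf_iff_prefix.mp hp)
        rw [show c :: rest = '"' :: '"' :: '"' :: t by rw [← ht]; rfl]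
        cases hs : splitQ t
        · exact absurd hs (splitQ_ne_nil t)
        · simp [splitQ, hs, List.modifyHead]
      · rw [if_neg hp, ih _ _ _ (by simp at h ⊢; omega)]
        rw [splitQ_cons_of_ne c rest (not_pre_of c rest hp)]
        cases hs : splitQ rest
        · exact absurd hs (splitQ_ne_nil rest)
        · simp [List.modifyHead]

theorem splitOn_eq (l : List Char) :
    PySem.Chars.splitOn l ['"', '"', '"'] = splitQ l := by
  rw [PySem.Chars.splitOn.eq_def, splitOn_go_eq (l.length + 1) l [] [] (by omega)]
  cases hs : splitQ l with
  | nil => exact absurd hs (splitQ_ne_nil l)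
  | cons x xs => simp [List.modifyHead]


theorem rq_cons_ne {c : Char} (h : c ≠ '"') (p : List Char) :
    rstripQuotes (c :: p) = c :: rstripQuotes p := by
  unfold rstripQuotes
  rw [show (c :: p).reverse = p.reverse ++ [c] by simp, List.dropWhile_append]
  split
  · next hemp =>
      simp [List.isEmpty_iff] at hemp
      simp [List.dropWhile, h]
      exact hemp
  · simp

theorem rq_cons_q {p : List Char} (h : rstripQuotes p ≠ []) :
    rstripQuotes ('"' :: p) = '"' :: rstripQuotes p := by
  unfold rstripQuotes at *
  rw [show ('"' :: p).reverse = p.reverse ++ ['"'] by simp, List.dropWhile_append]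
  split
  · next hemp =>
      simp [List.isEmpty_iff] at hemp
      exact absurd (by simp [List.dropWhile_eq_nil_iff]; exact hemp) h
  · simp


theorem bLoop_out (n : Nat) : ∀ (ps : List (List Char)), ps.length ≤ n → ∀ out,
    bLoop ps out = out ++ bLoop ps [] := by
  induction n with
  | zero =>
    intro ps h out
    match ps with
    | [] => simp [bLoop]
    | _ :: _ => simp at h
  | succ n ih =>
    intro ps h out
    match ps with
    | [] => simp [bLoop]
    | [a] => simp [bLoop]
    | a :: b :: t =>
      by_cases ht : t = []
      · subst ht; simp [bLoop]
      · rw [bLoop, if_neg ht, bLoop, if_neg ht,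
          ih t (by simp at h; omega) _, ih t (by simp at h; omega) (_ ++ _)]
        simp

def renderI : List (List Char) → List Char
  | [] => []
  | [p] => rstripQuotes p
  | p :: rest => p ++ ['"', '"', '"', '\n'] ++ bLoop rest []

theorem bLoop_cons (o : List Char) (ps : List (List Char)) :
    bLoop (o :: ps) [] = if ps = [] then [] else ['"', '"', '"'] ++ renderI ps := by
  cases ps with
  | nil => simp [bLoop]
  | cons p rest =>
    cases rest with
    | nil => simp [bLoop, renderI]
    | cons q t =>
      rw [bLoop, if_neg (by simp), bLoop_out (q :: t).length _ le_rfl]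
      simp [renderI]



theorem main_ind (n : Nat) : ∀ (cs : List Char), cs.length ≤ n → ∀ out,
    (truncAux (-3) out cs = out ++ bLoop (splitQ cs) [])
    ∧ (truncAux 0 out cs = out ++ renderI (splitQ cs)) := by
  induction n with
  | zero =>
    intro cs h out
    match cs with
    | [] => simp [truncAux, splitQ, bLoop, renderI, rstripQuotes]
    | _ :: _ => simp at h
  | succ n ih =>
    intro cs h out
    cases cs with
    | nil => simp [truncAux, splitQ, bLoop, renderI, rstripQuotes]
    | cons c r =>
      by_cases hc : c = '"'
      · subst hc
        cases r with
        | nil =>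
            have h1 : splitQ ['"'] = [['"']] := rfl
            norm_num [truncAux, h1, bLoop, renderI, rstripQuotes, List.dropWhile]
        | cons d r2 =>
          by_cases hd : d = '"'
          · subst hd
            cases r2 with
            | nil =>
                have h1 : splitQ ['"', '"'] = [['"', '"']] := rfl
                norm_num [truncAux, h1, bLoop, renderI, rstripQuotes, List.dropWhile]
            | cons e r3 =>
              have hlen : r3.length ≤ n := by simp at h; omega
              obtain ⟨x, xs, hx⟩ := List.exists_cons_of_ne_nil (splitQ_ne_nil r3)
              by_cases he : e = '"'
              · -- the triple quote: open or close a block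
                subst he
                have hsp : splitQ ('"'::'"'::'"'::r3) = [] :: splitQ r3 := rfl
                constructor
                · rw [show truncAux (-3) out ('"'::'"'::'"'::r3)
                      = truncAux 0 (out ++ ['"','"','"']) r3 by norm_num [truncAux]]
                  rw [(ih r3 hlen _).2, hsp, bLoop_cons, if_neg (by rw [hx]; simp)]
                  simp
                · rw [show truncAux 0 out ('"'::'"'::'"'::r3)
                      = truncAux (-3) (out ++ ['"','"','"','\n']) r3 by norm_num [truncAux]]
                  rw [(ih r3 hlen _).1, hsp, hx]
                  simp [renderI]
              · -- two quotes then a non-quote character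
                have hsp : splitQ ('"'::'"'::e::r3) = ('"'::'"'::e::x) :: xs := by
                  rw [splitQ_cons_of_ne _ _ (fun r' _ hr => he (by injection hr with h1 h2; injection h2)),
                      splitQ_cons_of_ne _ _ (fun r' _ hr => he (by injection hr with h1 h2)),
                      splitQ_cons_of_ne _ _ (fun r' hce _ => he hce), hx]
                  simp [List.modifyHead]
                constructor
                · rw [show truncAux (-3) out ('"'::'"'::e::r3)
                      = truncAux (-3) out r3 by norm_num [truncAux, he]]
                  rw [(ih r3 hlen _).1, hsp, hx, bLoop_cons, bLoop_cons]
                · rw [show truncAux 0 out ('"'::'"'::e::r3)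
                      = truncAux 0 (out ++ ['"','"',e]) r3 by norm_num [truncAux, he]]
                  rw [(ih r3 hlen _).2, hsp, hx]
                  cases xs with
                  | nil =>
                    have h1 : rstripQuotes ('"'::'"'::e::x) = '"'::'"'::e::rstripQuotes x := by
                      rw [rq_cons_q (p := '"'::e::x) (by rw [rq_cons_q (by rw [rq_cons_ne he]; simp), rq_cons_ne he]; simp),
                          rq_cons_q (by rw [rq_cons_ne he]; simp), rq_cons_ne he]
                    simp [renderI, h1]
                  | cons y t => simp [renderI]
          · -- one quote then a non-quote character
            have hlen : r2.length ≤ n := by simp at h; omega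
            obtain ⟨x, xs, hx⟩ := List.exists_cons_of_ne_nil (splitQ_ne_nil r2)
            have hsp : splitQ ('"'::d::r2) = ('"'::d::x) :: xs := by
              rw [splitQ_cons_of_ne _ _ (fun r' _ hr => hd (by injection hr with h1 h2)),
                  splitQ_cons_of_ne _ _ (fun r' hce _ => hd hce), hx]
              simp [List.modifyHead]
            constructor
            · rw [show truncAux (-3) out ('"'::d::r2)
                  = truncAux (-3) out r2 by norm_num [truncAux, hd]]
              rw [(ih r2 hlen _).1, hsp, hx, bLoop_cons, bLoop_cons]
            · rw [show truncAux 0 out ('"'::d::r2)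
                  = truncAux 0 (out ++ ['"',d]) r2 by norm_num [truncAux, hd]]
              rw [(ih r2 hlen _).2, hsp, hx]
              cases xs with
              | nil =>
                have h1 : rstripQuotes ('"'::d::x) = '"'::d::rstripQuotes x := by
                  rw [rq_cons_q (by rw [rq_cons_ne hd]; simp), rq_cons_ne hd]
                simp [renderI, h1]
              | cons y t => simp [renderI]
      · -- a non-quote character
        have hlen : r.length ≤ n := by simp at h; omega
        obtain ⟨x, xs, hx⟩ := List.exists_cons_of_ne_nil (splitQ_ne_nil r)
        have hsp : splitQ (c::r) = (c::x) :: xs := by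
          rw [splitQ_cons_of_ne _ _ (fun r' hce _ => hc hce), hx]
          simp [List.modifyHead]
        constructor
        · rw [show truncAux (-3) out (c::r)
              = truncAux (-3) out r by norm_num [truncAux, hc]]
          rw [(ih r hlen _).1, hsp, hx, bLoop_cons, bLoop_cons]
        · rw [show truncAux 0 out (c::r)
              = truncAux 0 (out ++ [c]) r by norm_num [truncAux, hc]]
          rw [(ih r hlen _).2, hsp, hx]
          cases xs with
          | nil => simp [renderI, rq_cons_ne hc]
          | cons y t => simp [renderI]

-- ===== VERDICT (by name: the statement is the Claim_ definition above) =====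
theorem truncate_input_spec : Claim_equal_truncate_input := by
  intro text _
  unfold Spec_truncate_input truncate_input truncate_input_alt
  rw [splitOn_eq]
  have h := (main_ind text.toList.length text.toList le_rfl []).1
  simp only [List.nil_append] at h
  rw [h]
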